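-- pv_equiv track=rewrite | github.com/KoushaAm/AutoSec | Pipeline/verifier/handlers/patch_handler.py | _find_smart_insertion_point
-- ===== SOURCE A (Python) =====
-- from typing import Dict, Any, List, Optional
--
-- def _find_smart_insertion_point(lines: List[str], new_content: str) -> int:
--     content_lower = new_content.lower().strip()
--
--     # If it's an if statement or control structure, insert before method end
--     if content_lower.startswith('if ') or content_lower.startswith('while ') or content_lower.startswith('for '):
--         # Find the last non-empty line before method closing brace
--         for i in reversed(range(len(lines))):
--             line = lines[i].strip()
--             if line and not line.startswith('//') and line != '}':
--                 # Insert after this line, before the closing brace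
--                 return i + 1
--
--     # Default: insert before the last closing brace
--     for i in reversed(range(len(lines))):
--         if lines[i].strip() == '}':
--             return i
--
--     # Fallback: append at end
--     return len(lines)
-- ===== SOURCE B (Python) =====
-- def _find_smart_insertion_point(lines, new_content):
--     # Tag every line once ('B' = closing brace, 'S' = significant, 'O' = other),
--     # then locate the answers with str.rfind on the tag string.
--     def tag(line):
--         s = line.strip()
--         if s == '}':
--             return 'B'
--         if s and not s.startswith('//'):
--             return 'S'
--         return 'O'
--     tags = ''.join(tag(l) for l in lines)
--     cl = new_content.lower().strip()
--     if cl.startswith(('if ', 'while ', 'for ')):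
--         i = tags.rfind('S')
--         if i != -1:
--             return i + 1
--     j = tags.rfind('B')
--     return j if j != -1 else len(lines)
-- ===== Notes on version B (the rewrite author's own statement) =====
-- stated objective: alternative
-- what changed: B classifies each line once into a tag character ('B'/'S'/'O'), joins the tags into a string, and answers both questions with str.rfind on that tag string, replacing A's two reverse early-return scans over the raw lines.
import Mathlib
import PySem

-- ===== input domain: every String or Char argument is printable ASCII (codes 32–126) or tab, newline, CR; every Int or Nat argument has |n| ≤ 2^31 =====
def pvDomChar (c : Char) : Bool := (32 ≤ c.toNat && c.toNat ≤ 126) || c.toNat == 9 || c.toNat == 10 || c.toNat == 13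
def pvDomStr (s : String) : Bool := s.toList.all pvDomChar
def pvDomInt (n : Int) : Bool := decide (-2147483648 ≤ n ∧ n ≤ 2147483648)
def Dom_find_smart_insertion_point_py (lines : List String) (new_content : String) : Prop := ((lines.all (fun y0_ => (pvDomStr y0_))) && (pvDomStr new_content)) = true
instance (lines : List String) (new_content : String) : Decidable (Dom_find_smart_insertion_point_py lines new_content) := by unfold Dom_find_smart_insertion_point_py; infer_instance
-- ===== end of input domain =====

-- B tags each line once ('B'/'S'/'O') and answers with str.rfind on the tag string
-- instead of A's two reverse early-return scans; same cost, different decomposition.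

-- ===== PORT A =====
-- reverse loop of A's control-structure branch: for i in reversed(range(n)): return i+1 on the
-- last significant line (none = loop fell through)
def pvA_ctrl (lines : List String) : Nat → Option Int
  | 0 => none
  | (i+1) =>
    let line := PySem.Str.strip (lines.getD i "")
    if line ≠ "" ∧ ¬ PySem.Str.startswith line "//" ∧ line ≠ "}" then some ((i : Int) + 1)
    else pvA_ctrl lines i

-- reverse loop of A's default branch: return i on the last line whose strip() == '}'
def pvA_brace (lines : List String) : Nat → Option Int
  | 0 => none
  | (i+1) =>
    if PySem.Str.strip (lines.getD i "") = "}" then some (i : Int)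
    else pvA_brace lines i

def find_smart_insertion_point_py (lines : List String) (new_content : String) : Int :=
  let content_lower := PySem.Str.strip (PySem.Str.lower new_content)
  let first :=
    if PySem.Str.startswith content_lower "if " || PySem.Str.startswith content_lower "while "
        || PySem.Str.startswith content_lower "for " then
      pvA_ctrl lines lines.length
    else none
  match first with
  | some r => r
  | none =>
    match pvA_brace lines lines.length with
    | some r => r
    | none => (lines.length : Int)

-- ===== PORT B =====
-- B's tag helper: classify one line
def pvTag (line : String) : Char :=
  let s := PySem.Str.strip line
  if s = "}" then 'B'
  else if s ≠ "" ∧ ¬ PySem.Str.startswith s "//" then 'S'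
  else 'O'

def find_smart_insertion_point_py_alt (lines : List String) (new_content : String) : Int :=
  -- ''.join(tag(l) for l in lines)
  let tags := String.ofList (lines.map pvTag)
  let cl := PySem.Str.strip (PySem.Str.lower new_content)
  let ctrl := PySem.Str.startswith cl "if " || PySem.Str.startswith cl "while "
      || PySem.Str.startswith cl "for "
  let i := PySem.Str.rfind tags "S"   -- computed only under ctrl in Source B; same value
  if ctrl = true ∧ i ≠ -1 then i + 1
  else
    let j := PySem.Str.rfind tags "B"
    if j ≠ -1 then j else (lines.length : Int)

-- ===== PRECONDITION & SPEC =====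
def Spec_find_smart_insertion_point_py (lines : List String) (new_content : String) (out : Int) : Prop := out = find_smart_insertion_point_py_alt lines new_content
instance (lines : List String) (new_content : String) (out : Int) : Decidable (Spec_find_smart_insertion_point_py lines new_content out) := by unfold Spec_find_smart_insertion_point_py; infer_instance

-- ===== CLAIM (what is proved, stated in full; the proofs are below) =====
def Claim_equal_find_smart_insertion_point_py : Prop := ∀ (lines : List String) (new_content : String), Dom_find_smart_insertion_point_py lines new_content → Spec_find_smart_insertion_point_py lines new_content (find_smart_insertion_point_py lines new_content)

-- ===== LEMMAS AND PROOFS =====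

-- last index k < lines.length with pvTag (lines[k]) = c among indices < bound, as rfind's Int (-1 = none)
def pvLast (lines : List String) (c : Char) : Nat → Int
  | 0 => -1
  | (k+1) => if k < lines.length ∧ pvTag (lines.getD k "") = c then (k : Int) else pvLast lines c k

lemma pv_prefix_single (cs : List Char) (c : Char) (j : Nat) :
    [c].isPrefixOf (cs.drop j) = true ↔ (j < cs.length ∧ cs[j]? = some c) := by
  by_cases hj : j < cs.length
  · rw [List.drop_eq_getElem_cons hj]
    rw [List.isPrefixOf_iff_prefix, List.cons_prefix_cons]
    simp [hj, eq_comm]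
  · rw [List.drop_eq_nil_of_le (Nat.not_lt.mp hj)]
    simp [List.isPrefixOf, List.getElem?_eq_none_iff.mpr (Nat.not_lt.mp hj)]

lemma pv_cond (lines : List String) (c : Char) (i : Nat) :
    ([c].isPrefixOf ((lines.map pvTag).drop i) = true)
      ↔ (i < lines.length ∧ pvTag (lines.getD i "") = c) := by
  rw [pv_prefix_single]
  by_cases h : i < lines.length
  · simp [h, List.getD_eq_getElem?_getD]
  · simp [h]

lemma pv_go_eq (lines : List String) (c : Char) :
    ∀ i, PySem.Chars.rfind.go (lines.map pvTag) [c] i = pvLast lines c (i+1) := by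
  intro i
  induction i with
  | zero =>
    have hc := pv_cond lines c 0
    rw [List.drop_zero] at hc
    simp only [PySem.Chars.rfind.go, pvLast]
    by_cases h : 0 < lines.length ∧ pvTag (lines.getD 0 "") = c
    · rw [if_pos (hc.mpr h), if_pos h]; simp
    · rw [if_neg (fun hh => h (hc.mp hh)), if_neg h]
  | succ j ih =>
    simp only [PySem.Chars.rfind.go, pvLast]
    by_cases h : j + 1 < lines.length ∧ pvTag (lines.getD (j+1) "") = c
    · rw [if_pos ((pv_cond lines c (j+1)).mpr h), if_pos h]
    · rw [if_neg (fun hh => h ((pv_cond lines c (j+1)).mp hh)), if_neg h, ih, pvLast]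

lemma pv_rfind_eq (lines : List String) (c : Char) :
    PySem.Chars.rfind (lines.map pvTag) [c] = pvLast lines c lines.length := by
  rw [PySem.Chars.rfind]
  simp only [List.length_map]
  rw [pv_go_eq lines c lines.length, pvLast]
  simp

lemma pv_tag_S (s : String) :
    pvTag s = 'S' ↔ (PySem.Str.strip s ≠ "" ∧ ¬ PySem.Str.startswith (PySem.Str.strip s) "//" = true
      ∧ PySem.Str.strip s ≠ "}") := by
  simp only [pvTag]
  split_ifs with h1 h2 <;> simp_all

lemma pv_tag_B (s : String) :
    pvTag s = 'B' ↔ PySem.Str.strip s = "}" := by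
  simp only [pvTag]
  split_ifs with h1 h2 <;> simp_all

lemma pv_ctrl_eq (lines : List String) :
    ∀ k, k ≤ lines.length →
      pvA_ctrl lines k = if pvLast lines 'S' k = -1 then none else some (pvLast lines 'S' k + 1) := by
  intro k
  induction k with
  | zero => intro _; simp [pvA_ctrl, pvLast]
  | succ k ih =>
    intro hk
    have hklen : k < lines.length := hk
    have hA : pvA_ctrl lines (k+1)
        = if (PySem.Str.strip (lines.getD k "") ≠ "" ∧ ¬ PySem.Str.startswith (PySem.Str.strip (lines.getD k "")) "//" = true ∧ PySem.Str.strip (lines.getD k "") ≠ "}")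
          then some ((k : Int) + 1) else pvA_ctrl lines k := rfl
    have hL : pvLast lines 'S' (k+1)
        = if k < lines.length ∧ pvTag (lines.getD k "") = 'S' then ((k : Nat) : Int)
          else pvLast lines 'S' k := rfl
    by_cases h : PySem.Str.strip (lines.getD k "") ≠ "" ∧ ¬ PySem.Str.startswith (PySem.Str.strip (lines.getD k "")) "//" = true ∧ PySem.Str.strip (lines.getD k "") ≠ "}"
    · have hcond : k < lines.length ∧ pvTag (lines.getD k "") = 'S' := ⟨hklen, (pv_tag_S _).mpr h⟩
      rw [hA, if_pos h, hL, if_pos hcond, if_neg (show ¬(((k : Nat) : Int) = -1) by omega)]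
    · have hncond : ¬(k < lines.length ∧ pvTag (lines.getD k "") = 'S') :=
        fun hc => h ((pv_tag_S _).mp hc.2)
      rw [hA, if_neg h, hL, if_neg hncond, ih (Nat.le_of_succ_le hk)]

lemma pv_brace_eq (lines : List String) :
    ∀ k, k ≤ lines.length →
      pvA_brace lines k = if pvLast lines 'B' k = -1 then none else some (pvLast lines 'B' k) := by
  intro k
  induction k with
  | zero => intro _; simp [pvA_brace, pvLast]
  | succ k ih =>
    intro hk
    have hklen : k < lines.length := hk
    have hA : pvA_brace lines (k+1)
        = if PySem.Str.strip (lines.getD k "") = "}" then some ((k : Int)) else pvA_brace lines k := rfl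
    have hL : pvLast lines 'B' (k+1)
        = if k < lines.length ∧ pvTag (lines.getD k "") = 'B' then ((k : Nat) : Int)
          else pvLast lines 'B' k := rfl
    by_cases h : PySem.Str.strip (lines.getD k "") = "}"
    · have hcond : k < lines.length ∧ pvTag (lines.getD k "") = 'B' := ⟨hklen, (pv_tag_B _).mpr h⟩
      rw [hA, if_pos h, hL, if_pos hcond, if_neg (show ¬(((k : Nat) : Int) = -1) by omega)]
    · have hncond : ¬(k < lines.length ∧ pvTag (lines.getD k "") = 'B') :=
        fun hc => h ((pv_tag_B _).mp hc.2)
      rw [hA, if_neg h, hL, if_neg hncond, ih (Nat.le_of_succ_le hk)]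

-- ===== VERDICT (by name: the statement is the Claim_ definition above) =====
theorem find_smart_insertion_point_py_spec : Claim_equal_find_smart_insertion_point_py := by
  intro lines new_content _
  unfold Spec_find_smart_insertion_point_py find_smart_insertion_point_py
    find_smart_insertion_point_py_alt
  have hrS : PySem.Str.rfind (String.ofList (lines.map pvTag)) "S" = pvLast lines 'S' lines.length := by
    rw [PySem.Str.rfind_eq]
    have : (String.ofList (lines.map pvTag)).toList = lines.map pvTag := by simp
    rw [this, show ("S" : String).toList = ['S'] from rfl]
    exact pv_rfind_eq lines 'S'
  have hrB : PySem.Str.rfind (String.ofList (lines.map pvTag)) "B" = pvLast lines 'B' lines.length := by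
    rw [PySem.Str.rfind_eq]
    have : (String.ofList (lines.map pvTag)).toList = lines.map pvTag := by simp
    rw [this, show ("B" : String).toList = ['B'] from rfl]
    exact pv_rfind_eq lines 'B'
  have hS := pv_ctrl_eq lines lines.length le_rfl
  have hB := pv_brace_eq lines lines.length le_rfl
  simp only [hrS, hrB, hS, hB]
  split_ifs <;> simp_all
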